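-- pv_equiv track=rewrite | github.com/danilonumeroso/advent_of_code | 2023/day_06/02.py | find_inf
-- ===== SOURCE A (Python) =====
-- def get_race_distance(time_spent_holding_the_button, time_limit):
--     """"
--         Get the distance covered by the boat given the time spent holding the button.
--     """
--     return (time_limit - time_spent_holding_the_button) * time_spent_holding_the_button
--
-- def compute_interval_length(a, b):
--     assert b >= a
--     return b - a + 1
--
-- def find_inf(time, record):
--     a, b = 0, time-1
--     while compute_interval_length(a, b) > 2:
--         c = (a + b) // 2
--         if get_race_distance(c, time) > record:
--             b = c
--         else:
--             a = c
--
--     return b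
-- ===== SOURCE B (Python) =====
-- def find_inf(time, record):
--     half = time // 2
--     if time < 2 or (time - half) * half <= record:
--         return time - 1
--     step = 1
--     while step * 2 <= half:
--         step *= 2
--     x = 0
--     while step >= 1:
--         n = x + step
--         if n < half and (time - n) * n <= record:
--             x = n
--         step //= 2
--     return x + 1
-- ===== Notes on version B (the rewrite author's own statement) =====
-- stated objective: alternative
-- what changed: Replaces A's interval-pair bisection over [0, time-1] (helper-based midpoint/interval-length loop) by an explicit unbeatable-record test plus a bitwise binary-lifting search over the monotone left half [0, time//2].
-- intended difference: For even time >= 8 with record = (time//2)**2 - 1 (exactly one winning hold time), A's midpoints skip the single winning value time//2 and A returns time-1 as if the record were unbeatable, while B returns time//2, the intended smallest record-beating hold time. — e.g. on find_inf(8, 15): A returns 7, B returns 4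
import Mathlib
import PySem

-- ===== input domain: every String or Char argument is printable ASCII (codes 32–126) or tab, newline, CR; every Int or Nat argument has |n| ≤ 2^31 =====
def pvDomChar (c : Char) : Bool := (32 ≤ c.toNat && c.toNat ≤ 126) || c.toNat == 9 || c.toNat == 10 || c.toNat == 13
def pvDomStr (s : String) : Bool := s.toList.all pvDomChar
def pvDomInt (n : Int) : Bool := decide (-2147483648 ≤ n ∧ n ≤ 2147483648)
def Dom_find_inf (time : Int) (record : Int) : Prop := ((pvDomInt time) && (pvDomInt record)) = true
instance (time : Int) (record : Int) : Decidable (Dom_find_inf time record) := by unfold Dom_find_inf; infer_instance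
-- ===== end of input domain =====

-- B replaces A's interval-pair bisection over [0, time-1] by an explicit unbeatable test plus a
-- bitwise (binary-lifting) search over the monotone left half [0, time//2]; objective: alternative.

-- ===== PORT A =====
def get_race_distance (time_spent_holding_the_button : Int) (time_limit : Int) : Int :=
  (time_limit - time_spent_holding_the_button) * time_spent_holding_the_button

-- Python's `assert b >= a` can only fail on the initial call (time ≤ 0), excluded by Pre_find_inf.
def compute_interval_length (a : Int) (b : Int) : Int := b - a + 1

-- A's while-loop; the fuel only makes it total (find_inf supplies enough: b - a shrinks each turn).
def findInfLoop (time record : Int) : Nat → Int → Int → Int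
  | 0, _, b => b
  | fuel + 1, a, b =>
    if compute_interval_length a b > 2 then
      let c := PySem.Int.floordiv (a + b) 2
      if get_race_distance c time > record then findInfLoop time record fuel a c
      else findInfLoop time record fuel c b
    else b

def find_inf (time : Int) (record : Int) : Int :=
  findInfLoop time record (time - 1).toNat 0 (time - 1)

-- ===== PORT B =====
-- `while step * 2 <= half: step *= 2` (fuel only for totality; enough is supplied)
def upStep (half : Int) : Nat → Int → Int
  | 0, step => step
  | fuel + 1, step => if step * 2 ≤ half then upStep half fuel (step * 2) else step

-- `while step >= 1: …` (fuel only for totality; enough is supplied)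
def downStep (time record half : Int) : Nat → Int → Int → Int
  | 0, x, _ => x
  | fuel + 1, x, step =>
    if 1 ≤ step then
      let n := x + step
      downStep time record half fuel
        (if n < half ∧ (time - n) * n ≤ record then n else x)
        (PySem.Int.floordiv step 2)
    else x

def find_inf_alt (time : Int) (record : Int) : Int :=
  let half := PySem.Int.floordiv time 2
  if time < 2 ∨ (time - half) * half ≤ record then time - 1
  else downStep time record half half.toNat 0 (upStep half half.toNat 1) + 1

-- ===== PRECONDITION & SPEC =====
-- Pre_ excludes exactly time ≤ 0, where A's `assert b >= a` raises AssertionError.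
def Pre_find_inf (time : Int) (record : Int) : Prop := 1 ≤ time
instance (time : Int) (record : Int) : Decidable (Pre_find_inf time record) := by
  unfold Pre_find_inf; infer_instance

def pvWitness_find_inf : Int × Int := (5, 3)

-- For even time ≥ 8 with record = (time/2)^2 - 1 (exactly one winning hold time), A's midpoints skip
-- the single winning value time/2 and A returns time-1 as if the record were unbeatable, while B
-- returns time/2, the intended smallest record-beating hold time.
def D_find_inf (time : Int) (record : Int) : Prop :=
  8 ≤ time ∧ time % 2 = 0 ∧ record = (time / 2) * (time / 2) - 1
instance (time : Int) (record : Int) : Decidable (D_find_inf time record) := by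
  unfold D_find_inf; infer_instance

def Spec_find_inf (time : Int) (record : Int) (out : Int) : Prop :=
  ¬ D_find_inf time record → out = find_inf_alt time record
instance (time : Int) (record : Int) (out : Int) : Decidable (Spec_find_inf time record out) := by
  unfold Spec_find_inf; infer_instance

def pvDiffWitness_find_inf : Int × Int := (8, 15)
def pvDiffWitnessOut_find_inf : Int × Int := (7, 4)

-- ===== CLAIM (what is proved, stated in full; the proofs are below) =====
def Claim_unchanged_find_inf : Prop := ∀ (time : Int) (record : Int), Dom_find_inf time record →
  Pre_find_inf time record → Spec_find_inf time record (find_inf time record)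
def Claim_changed_find_inf : Prop :=
  Dom_find_inf (pvDiffWitness_find_inf.1) (pvDiffWitness_find_inf.2) ∧
  Pre_find_inf (pvDiffWitness_find_inf.1) (pvDiffWitness_find_inf.2) ∧
  D_find_inf (pvDiffWitness_find_inf.1) (pvDiffWitness_find_inf.2) ∧
  find_inf (pvDiffWitness_find_inf.1) (pvDiffWitness_find_inf.2) = pvDiffWitnessOut_find_inf.1 ∧
  find_inf_alt (pvDiffWitness_find_inf.1) (pvDiffWitness_find_inf.2) = pvDiffWitnessOut_find_inf.2 ∧
  pvDiffWitnessOut_find_inf.1 ≠ pvDiffWitnessOut_find_inf.2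
def Claim_exact_find_inf : Prop := ∀ (time : Int) (record : Int), Dom_find_inf time record →
  Pre_find_inf time record → D_find_inf time record → find_inf time record ≠ find_inf_alt time record

-- ===== LEMMAS AND PROOFS =====

-- distance is monotone on the left half: 0 ≤ u ≤ v, 2v ≤ time ⇒ f u ≤ f v
theorem dist_mono {time u v : Int} (hu : 0 ≤ u) (huv : u ≤ v) (hv : 2 * v ≤ time) :
    (time - u) * u ≤ (time - v) * v := by nlinarith

-- everything right of the midpoint m = time/2 scores no better than m
theorem dist_right {time m x : Int} (hm : time ≤ 2 * m + 1) (hx : m < x) (h0 : 0 ≤ m) :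
    (time - x) * x ≤ (time - m) * m := by nlinarith

-- A's loop on an interval with no winning point returns b unchanged
theorem findInfLoop_dead (time record : Int) : ∀ (fuel : Nat) (a b : Int),
    (∀ x, a < x → x ≤ b → (time - x) * x ≤ record) →
    findInfLoop time record fuel a b = b := by
  intro fuel
  induction fuel with
  | zero => intro a b _; rfl
  | succ fuel ih =>
    intro a b hdead
    by_cases hg : compute_interval_length a b > 2
    · have hab : a + 2 ≤ b := by
        unfold compute_interval_length at hg; omega
      have hc := PySem.Int.floordiv_eq_ediv_of_pos (a := a + b) (b := 2) (by norm_num)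
      have hca : a < PySem.Int.floordiv (a + b) 2 := by rw [hc]; omega
      have hcb : PySem.Int.floordiv (a + b) 2 < b := by rw [hc]; omega
      have hnc : ¬ get_race_distance (PySem.Int.floordiv (a + b) 2) time > record := by
        unfold get_race_distance
        exact not_lt.2 (hdead _ hca (le_of_lt hcb))
      simp only [findInfLoop, if_pos hg, if_neg hnc]
      exact ih _ _ (fun x hx1 hx2 => hdead x (lt_trans hca hx1) hx2)
    · simp only [findInfLoop, if_neg hg]

-- A's loop once the right endpoint b is a winning point: the result r is a winning point
-- with a < r ≤ b and (r = a + 1 or r-1 loses)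
theorem findInfLoop_phase2 (time record : Int) : ∀ (fuel : Nat) (a b : Int),
    (b - a).toNat ≤ fuel → 0 ≤ a → a < b → record < (time - b) * b →
    (a = 0 ∨ (time - a) * a ≤ record) →
    record < (time - findInfLoop time record fuel a b) * (findInfLoop time record fuel a b) ∧
    a < findInfLoop time record fuel a b ∧ findInfLoop time record fuel a b ≤ b ∧
    (findInfLoop time record fuel a b = a + 1 ∨
      (time - (findInfLoop time record fuel a b - 1)) * (findInfLoop time record fuel a b - 1) ≤ record) := by
  intro fuel
  induction fuel with
  | zero => intro a b hfuel _ hab _ _; omega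
  | succ fuel ih =>
    intro a b hfuel ha hab hb haleft
    by_cases hg : compute_interval_length a b > 2
    · have hab2 : a + 2 ≤ b := by unfold compute_interval_length at hg; omega
      have hc := PySem.Int.floordiv_eq_ediv_of_pos (a := a + b) (b := 2) (by norm_num)
      have hca : a < PySem.Int.floordiv (a + b) 2 := by rw [hc]; omega
      have hcb : PySem.Int.floordiv (a + b) 2 < b := by rw [hc]; omega
      by_cases hpc : get_race_distance (PySem.Int.floordiv (a + b) 2) time > record
      · simp only [findInfLoop, if_pos hg, if_pos hpc]
        have hpc' : record < (time - PySem.Int.floordiv (a + b) 2) * PySem.Int.floordiv (a + b) 2 := by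
          unfold get_race_distance at hpc; linarith
        obtain ⟨h1, h2, h3, h4⟩ := ih a _ (by omega) ha hca hpc' haleft
        exact ⟨h1, h2, le_trans h3 (le_of_lt hcb), h4⟩
      · simp only [findInfLoop, if_pos hg, if_neg hpc]
        have hpc' : (time - PySem.Int.floordiv (a + b) 2) * PySem.Int.floordiv (a + b) 2 ≤ record := by
          unfold get_race_distance at hpc; linarith
        obtain ⟨h1, h2, h3, h4⟩ := ih _ b (by omega) (by omega) hcb hb (Or.inr hpc')
        refine ⟨h1, by omega, h3, ?_⟩
        rcases h4 with h4 | h4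
        · right; rw [h4]; simpa using hpc'
        · right; exact h4
    · have hba : b = a + 1 := by unfold compute_interval_length at hg; omega
      simp only [findInfLoop, if_neg hg]
      exact ⟨hb, hab, le_refl b, Or.inl (by omega)⟩

-- B's doubling loop: the result S is a power of two with s ≤ S, half < 2S, and S ≤ max s half
theorem upStep_spec (half : Int) : ∀ (fuel : Nat) (s : Int),
    1 ≤ s → (half - s).toNat ≤ fuel → (∃ k : Nat, s = 2 ^ k) →
    (∃ k : Nat, upStep half fuel s = 2 ^ k) ∧ s ≤ upStep half fuel s ∧
    half < 2 * upStep half fuel s ∧ (upStep half fuel s ≤ half ∨ upStep half fuel s = s) := by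
  intro fuel
  induction fuel with
  | zero =>
    intro s hs hfuel hpow
    refine ⟨hpow, le_refl s, ?_, Or.inr rfl⟩
    show half < 2 * s
    omega
  | succ fuel ih =>
    intro s hs hfuel hpow
    simp only [upStep]
    by_cases hg : s * 2 ≤ half
    · rw [if_pos hg]
      obtain ⟨k, hk⟩ := hpow
      obtain ⟨h1, h2, h3, h4⟩ := ih (s * 2) (by omega) (by omega)
        ⟨k + 1, by rw [hk]; ring⟩
      exact ⟨h1, by omega, h3, by omega⟩
    · rw [if_neg hg]
      exact ⟨hpow, le_refl s, by omega, Or.inr rfl⟩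

theorem downStep_zero (time record half : Int) :
    ∀ (fuel : Nat) (x : Int), downStep time record half fuel x 0 = x := by
  intro fuel x
  cases fuel with
  | zero => rfl
  | succ fuel => simp [downStep]

-- B's halving loop: starting from x with the invariant below, the result r either is 0 or is a
-- losing point strictly left of half, and every losing point left of half is ≤ r.
theorem downStep_spec (time record half : Int) (hm : 2 * half ≤ time) :
    ∀ (fuel : Nat) (x s : Int),
    (∃ k : Nat, s = 2 ^ k) → s.toNat ≤ fuel → 0 ≤ x →
    (x = 0 ∨ (x < half ∧ (time - x) * x ≤ record)) →
    (∀ y, y < half → (time - y) * y ≤ record → y < x + 2 * s) →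
    0 ≤ downStep time record half fuel x s ∧
    (downStep time record half fuel x s = 0 ∨
      (downStep time record half fuel x s < half ∧
        (time - downStep time record half fuel x s) * downStep time record half fuel x s ≤ record)) ∧
    (∀ y, y < half → (time - y) * y ≤ record → y ≤ downStep time record half fuel x s) := by
  intro fuel
  induction fuel with
  | zero =>
    intro x s hpow hfuel _ _ _
    obtain ⟨k, hk⟩ := hpow
    have hp : (0 : Int) < 2 ^ k := pow_pos (by norm_num) k
    omega
  | succ fuel ih =>
    intro x s hpow hfuel hx hxinv hJ2
    obtain ⟨k, hk⟩ := hpow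
    have hs1 : (1 : Int) ≤ s := by
      have hp : (0 : Int) < 2 ^ k := pow_pos (by norm_num) k; omega
    simp only [downStep, if_pos hs1]
    cases k with
    | zero =>
      -- s = 1: last step, then step becomes 0 and the loop stops
      have hs : s = 1 := by simpa using hk
      subst hs
      have h0 : PySem.Int.floordiv 1 2 = 0 := by decide
      rw [h0, downStep_zero]
      by_cases htake : x + 1 < half ∧ (time - (x + 1)) * (x + 1) ≤ record
      · rw [if_pos htake]
        refine ⟨by omega, Or.inr ⟨htake.1, htake.2⟩, fun y hy hyr => ?_⟩
        have := hJ2 y hy hyr; omega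
      · rw [if_neg htake]
        refine ⟨hx, hxinv, fun y hy hyr => ?_⟩
        have hlt := hJ2 y hy hyr
        by_contra hcon
        have hyx : y = x + 1 := by omega
        exact htake (hyx ▸ ⟨hy, hyr⟩)
    | succ k' =>
      have hs2 : s = 2 * 2 ^ k' := by rw [hk]; ring
      have hhalf : PySem.Int.floordiv s 2 = 2 ^ k' := by
        rw [PySem.Int.floordiv_eq_ediv_of_pos (by norm_num), hs2]; omega
      have hpk : (1 : Int) ≤ 2 ^ k' := by
        have hp : (0 : Int) < 2 ^ k' := pow_pos (by norm_num) k'; omega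
      rw [hhalf]
      by_cases htake : x + s < half ∧ (time - (x + s)) * (x + s) ≤ record
      · rw [if_pos htake]
        exact ih (x + s) (2 ^ k') ⟨k', rfl⟩ (by omega) (by omega)
          (Or.inr ⟨htake.1, htake.2⟩)
          (fun y hy hyr => by have := hJ2 y hy hyr; omega)
      · rw [if_neg htake]
        refine ih x (2 ^ k') ⟨k', rfl⟩ (by omega) hx hxinv (fun y hy hyr => ?_)
        -- no losing point ≥ x + s remains left of half: losing is downward closed there
        by_contra hcon
        have hxs : x + s ≤ y := by omega
        have hns : (time - (x + s)) * (x + s) ≤ record := by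
          have := dist_mono (u := x + s) (v := y) (time := time) (by omega) hxs (by omega)
          linarith
        exact htake ⟨by omega, hns⟩

-- the smallest winning hold time is uniquely characterised
theorem char_unique (time record m : Int) (hm : 2 * m ≤ time)
    (v1 v2 : Int)
    (h1 : 1 ≤ v1 ∧ v1 ≤ m ∧ record < (time - v1) * v1 ∧
      (v1 = 1 ∨ (time - (v1 - 1)) * (v1 - 1) ≤ record))
    (h2 : 1 ≤ v2 ∧ v2 ≤ m ∧ record < (time - v2) * v2 ∧
      (v2 = 1 ∨ (time - (v2 - 1)) * (v2 - 1) ≤ record)) : v1 = v2 := by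
  obtain ⟨h11, h12, h13, h14⟩ := h1
  obtain ⟨h21, h22, h23, h24⟩ := h2
  by_contra hne
  rcases lt_or_gt_of_ne hne with hlt | hlt
  · rcases h24 with h24 | h24
    · omega
    · have := dist_mono (time := time) (u := v1) (v := v2 - 1) (by omega) (by omega) (by omega)
      linarith
  · rcases h14 with h14 | h14
    · omega
    · have := dist_mono (time := time) (u := v2) (v := v1 - 1) (by omega) (by omega) (by omega)
      linarith

-- B's value in the beatable case satisfies the characterisation
theorem find_inf_alt_char (time record : Int) (h2 : 2 ≤ time)
    (hbeat : record < (time - time / 2) * (time / 2)) :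
    1 ≤ find_inf_alt time record ∧ find_inf_alt time record ≤ time / 2 ∧
    record < (time - find_inf_alt time record) * (find_inf_alt time record) ∧
    (find_inf_alt time record = 1 ∨
      (time - (find_inf_alt time record - 1)) * (find_inf_alt time record - 1) ≤ record) := by
  have hfd : PySem.Int.floordiv time 2 = time / 2 :=
    PySem.Int.floordiv_eq_ediv_of_pos (by norm_num)
  set m := time / 2 with hmdef
  have hm1 : 1 ≤ m := by omega
  have hm2 : 2 * m ≤ time := by omega
  have hnot : ¬ (time < 2 ∨ (time - PySem.Int.floordiv time 2) * PySem.Int.floordiv time 2 ≤ record) := by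
    rw [hfd]
    rintro (h | h)
    · omega
    · linarith
  have hup := upStep_spec m m.toNat 1 (by omega) (by omega) ⟨0, by norm_num⟩
  obtain ⟨hupow, hup1, hup2, hup3⟩ := hup
  set S := upStep m m.toNat 1 with hSdef
  have hdn := downStep_spec time record m hm2 m.toNat 0 S hupow (by omega) (by omega)
    (Or.inl rfl) (fun y hy _ => by omega)
  obtain ⟨hd0, hdinv, hdmax⟩ := hdn
  set r := downStep time record m m.toNat 0 S with hrdef
  have halt : find_inf_alt time record = r + 1 := by
    unfold find_inf_alt
    rw [if_neg hnot]
    simp only [hfd, ← hSdef, ← hrdef]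
  rw [halt]
  have hrm : r ≤ m - 1 := by rcases hdinv with h | h <;> omega
  refine ⟨by omega, by omega, ?_, ?_⟩
  · -- r + 1 wins: either r + 1 = m (beatable) or maximality forces it
    by_cases hrm' : r + 1 = m
    · rw [hrm']; exact hbeat
    · by_contra hcon
      have := hdmax (r + 1) (by omega) (by linarith)
      omega
  · rcases hdinv with h | h
    · left; omega
    · right; simpa using h.2

-- one controlled unfolding step of A's loop
theorem findInfLoop_step (time record : Int) (fuel : Nat) (a b : Int) :
    findInfLoop time record (fuel + 1) a b =
      if compute_interval_length a b > 2 then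
        (if get_race_distance (PySem.Int.floordiv (a + b) 2) time > record
         then findInfLoop time record fuel a (PySem.Int.floordiv (a + b) 2)
         else findInfLoop time record fuel (PySem.Int.floordiv (a + b) 2) b)
      else b := rfl

-- the first iteration of A's loop when the first midpoint wins
theorem find_inf_enter (time record c0 : Int) (k : Nat) (hk : (time - 1).toNat = k + 1)
    (h3 : 3 ≤ time) (hc0 : c0 = (time - 1) / 2)
    (hPc0 : record < (time - c0) * c0) :
    find_inf time record = findInfLoop time record k 0 c0 := by
  unfold find_inf
  rw [hk, findInfLoop_step]
  have hg : compute_interval_length 0 (time - 1) > 2 := by unfold compute_interval_length; omega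
  have hc : PySem.Int.floordiv (0 + (time - 1)) 2 = c0 := by
    rw [PySem.Int.floordiv_eq_ediv_of_pos (by norm_num), hc0]; omega
  have hpc : get_race_distance (PySem.Int.floordiv (0 + (time - 1)) 2) time > record := by
    unfold get_race_distance; rw [hc]; exact hPc0
  rw [if_pos hg, if_pos hpc, hc]

-- A's value in the beatable case (time ≥ 2, not in D_) satisfies the same characterisation
theorem find_inf_char (time record : Int) (h2 : 2 ≤ time)
    (hbeat : record < (time - time / 2) * (time / 2))
    (hnD : ¬ D_find_inf time record) :
    1 ≤ find_inf time record ∧ find_inf time record ≤ time / 2 ∧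
    record < (time - find_inf time record) * (find_inf time record) ∧
    (find_inf time record = 1 ∨
      (time - (find_inf time record - 1)) * (find_inf time record - 1) ≤ record) := by
  obtain ⟨m, hmdef⟩ : ∃ m, time / 2 = m := ⟨_, rfl⟩
  rw [hmdef] at hbeat ⊢
  have hm2 : 2 * m ≤ time := by omega
  have hm3 : time ≤ 2 * m + 1 := by omega
  have hm1 : 1 ≤ m := by omega
  by_cases ht2 : time ≤ 2
  · -- time = 2: the loop body never runs, A returns 1
    have ht : time = 2 := by omega
    subst ht
    have hm : m = 1 := by omega
    subst hm
    have heval : find_inf 2 record = 1 := by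
      have h1 : ((2 : Int) - 1).toNat = 1 := by norm_num
      unfold find_inf
      rw [h1, findInfLoop_step]
      norm_num [compute_interval_length]
    rw [heval]
    exact ⟨le_refl 1, le_refl 1, by linarith, Or.inl rfl⟩
  · have ht3 : 3 ≤ time := by omega
    obtain ⟨k, hk⟩ : ∃ k, (time - 1).toNat = k + 1 := ⟨(time - 1).toNat - 1, by omega⟩
    by_cases heven : time % 2 = 0
    · by_cases hPm1 : record < (time - (m - 1)) * (m - 1)
      · -- first midpoint is m-1 and it wins: phase 2 on [0, m-1]
        have hmm : 2 ≤ m := by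
          by_contra hcon
          have : m = 1 := by omega
          subst this
          simp at hPm1
          omega
        rw [find_inf_enter time record (m - 1) k hk ht3 (by omega) hPm1]
        obtain ⟨p1, p2, p3, p4⟩ := findInfLoop_phase2 time record k 0 (m - 1)
          (by omega) (le_refl 0) (by omega) hPm1 (Or.inl rfl)
        refine ⟨by omega, by omega, p1, ?_⟩
        rcases p4 with p4 | p4
        · exact Or.inl (by omega)
        · exact Or.inr p4
      · -- m-1 loses while m wins: record = m*m - 1, so by ¬D_ time is 4 or 6; compute
        have htm : time = 2 * m := by omega
        have hle : (time - (m - 1)) * (m - 1) ≤ record := not_lt.mp hPm1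
        have hq1 : m * m - 1 ≤ record := by nlinarith
        have hq2 : record < m * m := by nlinarith
        have heq : record = m * m - 1 := by omega
        have ht8 : time < 8 := by
          by_contra h8
          apply hnD
          unfold D_find_inf
          exact ⟨by omega, heven, by rw [hmdef]; exact heq⟩
        have h46 : time = 4 ∨ time = 6 := by omega
        rcases h46 with h | h <;> subst h
        · have hm' : m = 2 := by omega
          subst hm'
          have hr : record = 3 := by omega
          subst hr
          refine ⟨by decide, by decide, by decide, Or.inr (by decide)⟩
        · have hm' : m = 3 := by omega
          subst hm'
          have hr : record = 8 := by omega
          subst hr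
          refine ⟨by decide, by decide, by decide, Or.inr (by decide)⟩
    · -- odd time: the first midpoint is m itself and it wins
      have hc0 : m = (time - 1) / 2 := by omega
      rw [find_inf_enter time record m k hk ht3 hc0 hbeat]
      obtain ⟨p1, p2, p3, p4⟩ := findInfLoop_phase2 time record k 0 m
        (by omega) (le_refl 0) (by omega) hbeat (Or.inl rfl)
      refine ⟨by omega, p3, p1, ?_⟩
      rcases p4 with p4 | p4
      · exact Or.inl (by omega)
      · exact Or.inr p4

theorem main_eq (time record : Int) (hpre : 1 ≤ time) (hnD : ¬ D_find_inf time record) :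
    find_inf time record = find_inf_alt time record := by
  have hfd : PySem.Int.floordiv time 2 = time / 2 :=
    PySem.Int.floordiv_eq_ediv_of_pos (by norm_num)
  by_cases ht1 : time = 1
  · subst ht1
    have hA : find_inf 1 record = 0 := by
      unfold find_inf
      norm_num
      rfl
    have hB : find_inf_alt 1 record = 0 := by
      unfold find_inf_alt
      rw [if_pos (Or.inl (by norm_num))]
      norm_num
    rw [hA, hB]
  · have h2 : 2 ≤ time := by omega
    by_cases hbeat : record < (time - time / 2) * (time / 2)
    · -- beatable: both sides satisfy the unique characterisation of the least winning hold
      exact char_unique time record (time / 2) (by omega) _ _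
        (find_inf_char time record h2 hbeat hnD)
        (find_inf_alt_char time record h2 hbeat)
    · -- unbeatable: A's loop never moves b, B's guard fires; both return time - 1
      have hle : (time - time / 2) * (time / 2) ≤ record := not_lt.mp hbeat
      have hA : find_inf time record = time - 1 := by
        unfold find_inf
        apply findInfLoop_dead
        intro x hx0 hxb
        by_cases hxm : x ≤ time / 2
        · exact le_trans (dist_mono (by omega) hxm (by omega)) hle
        · exact le_trans (dist_right (by omega) (by omega) (by omega)) hle
      have hB : find_inf_alt time record = time - 1 := by
        unfold find_inf_alt
        rw [hfd, if_pos (Or.inr hle)]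
      rw [hA, hB]

-- ===== VERDICT (by name: the statement is the Claim_ definition above) =====
theorem find_inf_spec : Claim_unchanged_find_inf := by
  intro time record _ hpre hnD
  exact main_eq time record hpre hnD

theorem find_inf_changed : Claim_changed_find_inf := by
  unfold Claim_changed_find_inf; decide

theorem find_inf_tight : Claim_exact_find_inf := by
  intro time record _ hpre hD
  unfold D_find_inf at hD
  obtain ⟨h8, heven, hrec⟩ := hD
  obtain ⟨m, hmdef⟩ : ∃ m, time / 2 = m := ⟨_, rfl⟩
  rw [hmdef] at hrec
  have htm : time = 2 * m := by omega
  have hm4 : 4 ≤ m := by omega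
  -- A misses the single winning hold time m and returns time - 1
  have hA : find_inf time record = time - 1 := by
    unfold find_inf
    obtain ⟨k, hk⟩ : ∃ k, (time - 1).toNat = k + 2 := ⟨(time - 1).toNat - 2, by omega⟩
    rw [hk, findInfLoop_step]
    have hg1 : compute_interval_length 0 (time - 1) > 2 := by
      unfold compute_interval_length; omega
    have hc1 : PySem.Int.floordiv (0 + (time - 1)) 2 = m - 1 := by
      rw [PySem.Int.floordiv_eq_ediv_of_pos (by norm_num)]; omega
    have hp1 : ¬ get_race_distance (PySem.Int.floordiv (0 + (time - 1)) 2) time > record := by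
      rw [hc1]; unfold get_race_distance; simp only [not_lt]
      rw [htm, hrec]; nlinarith
    rw [if_pos hg1, if_neg hp1, hc1, findInfLoop_step]
    have hg2 : compute_interval_length (m - 1) (time - 1) > 2 := by
      unfold compute_interval_length; omega
    have hc2 : PySem.Int.floordiv ((m - 1) + (time - 1)) 2 = (3 * m - 2) / 2 := by
      rw [PySem.Int.floordiv_eq_ediv_of_pos (by norm_num)]; omega
    have hc2b : m + 1 ≤ (3 * m - 2) / 2 ∧ (3 * m - 2) / 2 ≤ 2 * m - 2 := by omega
    have hp2 : ¬ get_race_distance (PySem.Int.floordiv ((m - 1) + (time - 1)) 2) time > record := by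
      rw [hc2]; unfold get_race_distance; simp only [not_lt]
      have key : 0 ≤ ((3 * m - 2) / 2 - m - 1) * ((3 * m - 2) / 2 - m + 1) :=
        mul_nonneg (by omega) (by omega)
      rw [htm, hrec]; nlinarith
    rw [if_pos hg2, if_neg hp2, hc2]
    apply findInfLoop_dead
    intro x hx1 hx2
    have hxm : m + 1 ≤ x := by omega
    have key : 0 ≤ (x - m - 1) * (x - m + 1) := mul_nonneg (by omega) (by omega)
    rw [htm, hrec]; nlinarith
  -- B returns the winning hold time m
  have hB : find_inf_alt time record = m := by
    have hbeat : record < (time - time / 2) * (time / 2) := by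
      rw [hmdef, htm, hrec]; nlinarith
    have hch := find_inf_alt_char time record (by omega) hbeat
    rw [hmdef] at hch
    refine char_unique time record m (by omega) _ m hch
      ⟨by omega, le_refl m, ?_, Or.inr ?_⟩
    · rw [htm, hrec]; nlinarith
    · rw [htm, hrec]; nlinarith
  rw [hA, hB]; omega
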